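-- pv_equiv track=rewrite | github.com/SirNaCl/AdventOfCode | 2023/04/solution.py | part1
-- ===== SOURCE A (Python) =====
-- def part1(data: list[tuple[set[str], set[str]]]):
--     """Solve part 1."""
--     tot = 0
--     for have, won in data:
--         game_score = 0
--         for n in have:
--             if n == "":
--                 continue
--             if n in won:
--                 game_score = 1 if game_score == 0 else game_score * 2
--
--         tot += game_score
--     return tot
-- ===== SOURCE B (Python) =====
-- def part1(data: list[tuple[set[str], set[str]]]):
--     """Solve part 1: sort each card's numbers and count matches by a two-pointer merge scan."""
--     total = 0
--     for have, won in data: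
--         h = sorted(n for n in have if n != "")
--         w = sorted(won)
--         i = j = m = 0
--         while i < len(h) and j < len(w):
--             if h[i] < w[j]:
--                 i += 1
--             elif w[j] < h[i]:
--                 j += 1
--             else:
--                 m += 1
--                 i += 1
--                 j += 1
--         if m:
--             total += 2 ** (m - 1)
--     return total
-- ===== Notes on version B (the rewrite author's own statement) =====
-- stated objective: alternative
-- what changed: Replaces the per-element membership test with incremental score doubling by sorting each card's two sets and counting matches with a two-pointer merge scan, then adding the closed-form power 2**(m-1).
import Mathlib
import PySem

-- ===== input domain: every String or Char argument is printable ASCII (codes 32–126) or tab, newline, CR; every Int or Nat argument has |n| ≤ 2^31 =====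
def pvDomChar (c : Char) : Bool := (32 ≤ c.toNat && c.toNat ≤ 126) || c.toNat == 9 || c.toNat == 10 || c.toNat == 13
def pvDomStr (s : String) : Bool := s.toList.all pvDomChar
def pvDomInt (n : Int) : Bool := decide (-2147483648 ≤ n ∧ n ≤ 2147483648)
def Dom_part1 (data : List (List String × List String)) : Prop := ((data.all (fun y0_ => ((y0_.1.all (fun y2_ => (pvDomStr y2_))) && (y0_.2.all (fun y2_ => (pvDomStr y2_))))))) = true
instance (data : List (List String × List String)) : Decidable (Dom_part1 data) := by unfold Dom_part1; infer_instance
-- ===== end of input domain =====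

-- B sorts each card's two sets and counts matches with a two-pointer merge scan, then
-- adds the closed-form power 2^(m-1), instead of A's membership tests with score doubling.

-- ===== PORT A =====
-- inner loop body: skip "", double (or start at 1) on a match
def part1Inner (won : List String) (s : Int) (n : String) : Int :=
  if n = "" then s
  else if won.contains n then (if s = 0 then 1 else s * 2)
  else s

def part1 (data : List (List String × List String)) : Int :=
  data.foldl (fun tot p => tot + p.1.foldl (part1Inner p.2) 0) 0

-- ===== PORT B =====
-- the while loop over indices i, j: advance the smaller head, count equal heads
def mergeCount : List String → List String → Nat
  | [], _ => 0
  | _ :: _, [] => 0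
  | a :: as, b :: bs =>
    if a < b then mergeCount as (b :: bs)
    else if b < a then mergeCount (a :: as) bs
    else 1 + mergeCount as bs

def part1_alt (data : List (List String × List String)) : Int :=
  data.foldl (fun total p =>
    let h := PySem.List.sorted (p.1.filter (fun n => n ≠ "")) (fun x => x) false
    let w := PySem.List.sorted p.2 (fun x => x) false
    let m := mergeCount h w
    if m ≠ 0 then total + 2 ^ (m - 1) else total) 0

-- ===== PRECONDITION & SPEC =====
-- Pre_ states the set-representation invariant of the type convention (Python sets hold
-- distinct elements); it excludes no input the Python A accepts, since A's arguments are sets.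
def Pre_part1 (data : List (List String × List String)) : Prop :=
  ∀ p ∈ data, p.1.Nodup ∧ p.2.Nodup

instance (data : List (List String × List String)) : Decidable (Pre_part1 data) := by
  unfold Pre_part1; infer_instance

def pvWitness_part1 : (List (List String × List String)) :=
  [(["1", "2", ""], ["2", "3"]), (["7"], ["8"])]

def Spec_part1 (data : List (List String × List String)) (out : Int) : Prop := out = part1_alt data
instance (data : List (List String × List String)) (out : Int) : Decidable (Spec_part1 data out) := by unfold Spec_part1; infer_instance

-- ===== CLAIM (what is proved, stated in full; the proofs are below) =====
def Claim_equal_part1 : Prop := ∀ (data : List (List String × List String)), Dom_part1 data → Pre_part1 data → Spec_part1 data (part1 data)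

-- ===== LEMMAS AND PROOFS =====

-- once the score is a power of two, each further match doubles it
lemma inner_pow (won : List String) (l : List String) (k : Nat) :
    l.foldl (part1Inner won) (2 ^ k)
      = 2 ^ (k + (l.filter (fun n => n ≠ "" && won.contains n)).length) := by
  induction l generalizing k with
  | nil => simp
  | cons n t ih =>
    by_cases h0 : n = ""
    · rw [List.foldl_cons, List.filter_cons_of_neg (by simp [h0])]
      have hstep : part1Inner won ((2 : Int) ^ k) n = 2 ^ k := by simp [part1Inner, h0]
      rw [hstep]; exact ih k
    · by_cases hw : n ∈ won
      · have h2 : (2 : Int) ^ k ≠ 0 := by positivity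
        have hstep : part1Inner won ((2 : Int) ^ k) n = 2 ^ (k + 1) := by
          simp [part1Inner, h0, hw, h2, pow_succ]
        rw [List.foldl_cons, hstep, List.filter_cons_of_pos (by simp [h0, hw]),
          ih (k + 1), List.length_cons]
        congr 1
        omega
      · rw [List.foldl_cons, List.filter_cons_of_neg (by simp [hw])]
        have hstep : part1Inner won ((2 : Int) ^ k) n = 2 ^ k := by
          simp [part1Inner, h0, hw]
        rw [hstep]; exact ih k

-- A's inner loop from 0 computes 2^(m-1) for m > 0 matches (else 0)
lemma inner_closed (won : List String) (l : List String) :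
    l.foldl (part1Inner won) 0
      = (if (l.filter (fun n => n ≠ "" && won.contains n)).length ≠ 0
         then (2 : Int) ^ ((l.filter (fun n => n ≠ "" && won.contains n)).length - 1)
         else 0) := by
  induction l with
  | nil => simp
  | cons n t ih =>
    by_cases h0 : n = ""
    · rw [List.foldl_cons, List.filter_cons_of_neg (by simp [h0])]
      have hstep : part1Inner won 0 n = 0 := by simp [part1Inner, h0]
      rw [hstep]; exact ih
    · by_cases hw : n ∈ won
      · have hstep : part1Inner won 0 n = 1 := by simp [part1Inner, h0, hw]
        have hpow := inner_pow won t 0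
        simp only [pow_zero, Nat.zero_add] at hpow
        rw [List.foldl_cons, hstep, List.filter_cons_of_pos (by simp [h0, hw]),
          List.length_cons, hpow]
        simp
      · rw [List.foldl_cons, List.filter_cons_of_neg (by simp [hw])]
        have hstep : part1Inner won 0 n = 0 := by simp [part1Inner, h0, hw]
        rw [hstep]; exact ih

-- merge scan on strictly increasing lists counts the common elements
lemma mergeCount_eq (h w : List String) (hh : h.Pairwise (· < ·)) (hw : w.Pairwise (· < ·)) :
    mergeCount h w = (h.filter (fun a => w.contains a)).length := by
  induction h generalizing w with
  | nil => simp [mergeCount]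
  | cons a as ih =>
    induction w with
    | nil => simp [mergeCount]
    | cons b bs ihw =>
      rw [List.pairwise_cons] at hh hw
      by_cases hab : a < b
      · have hnotin : a ∉ b :: bs := by
          intro hmem
          rcases List.mem_cons.mp hmem with rfl | hmem
          · exact absurd hab (lt_irrefl _)
          · exact absurd (hab.trans (hw.1 _ hmem)) (lt_irrefl _)
        rw [show mergeCount (a :: as) (b :: bs) = mergeCount as (b :: bs) by
              simp [mergeCount, hab],
          List.filter_cons_of_neg (by simpa using hnotin)]
        exact ih _ hh.2 (List.pairwise_cons.mpr hw)
      · by_cases hba : b < a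
        · have hfilter : (a :: as).filter (fun x => (b :: bs).contains x)
              = (a :: as).filter (fun x => bs.contains x) := by
            apply List.filter_congr
            intro x hx
            have hbx : b < x := by
              rcases List.mem_cons.mp hx with rfl | hx
              · exact hba
              · exact hba.trans (hh.1 _ hx)
            simp only [List.contains_cons]
            have : x ≠ b := fun he => absurd (he ▸ hbx) (lt_irrefl _)
            simp [this]
          rw [show mergeCount (a :: as) (b :: bs) = mergeCount (a :: as) bs by
                simp [mergeCount, hab, hba],
            hfilter]
          exact ihw hw.2
        · have heq : a = b := le_antisymm (le_of_not_gt hba) (le_of_not_gt hab)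
          have hfilter : as.filter (fun x => (b :: bs).contains x)
              = as.filter (fun x => bs.contains x) := by
            apply List.filter_congr
            intro x hx
            have : x ≠ b := by
              intro he
              exact absurd (heq ▸ he ▸ hh.1 x hx) (lt_irrefl _)
            simp [this]
          rw [show mergeCount (a :: as) (b :: bs) = 1 + mergeCount as bs by
                simp [mergeCount, hab, hba],
            List.filter_cons_of_pos (by simp [heq]),
            List.length_cons, ih _ hh.2 hw.2, hfilter]
          omega

-- the sorted, nodup output of Python's sorted is strictly increasing
lemma sorted_strict (l : List String) (hnd : l.Nodup) :
    (PySem.List.sorted l (fun x => x) false).Pairwise (· < ·) := by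
  have hle : (PySem.List.sorted l (fun x => x) false).Pairwise (· ≤ ·) := by
    simpa using PySem.List.sorted_pairwise (xs := l) (key := fun x => x)
  have hnd' : (PySem.List.sorted l (fun x => x) false).Nodup :=
    (PySem.List.sorted_perm (xs := l) (key := fun x => x) (rev := false)).nodup_iff.mpr hnd
  exact (hle.and hnd').imp (fun hab => lt_of_le_of_ne hab.1 hab.2)

-- per card, B's merge-scan count is A's match count
lemma card_count (have_ won : List String) (h1 : have_.Nodup) (h2 : won.Nodup) :
    mergeCount (PySem.List.sorted (have_.filter (fun n => n ≠ "")) (fun x => x) false)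
        (PySem.List.sorted won (fun x => x) false)
      = (have_.filter (fun n => n ≠ "" && won.contains n)).length := by
  set h := PySem.List.sorted (have_.filter (fun n => n ≠ "")) (fun x => x) false with hh
  set w := PySem.List.sorted won (fun x => x) false with hw
  have hperm : h.Perm (have_.filter (fun n => n ≠ "")) :=
    PySem.List.sorted_perm (xs := have_.filter (fun n => n ≠ "")) (key := fun x => x) (rev := false)
  have wperm : w.Perm won :=
    PySem.List.sorted_perm (xs := won) (key := fun x => x) (rev := false)
  rw [mergeCount_eq h w (sorted_strict _ (h1.filter _)) (sorted_strict _ h2)]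
  have hcongr : h.filter (fun a => w.contains a) = h.filter (fun a => won.contains a) := by
    apply List.filter_congr
    intro x _
    simp [wperm.mem_iff]
  rw [hcongr, (hperm.filter (fun a => won.contains a)).length_eq, List.filter_filter]
  congr 1
  apply List.filter_congr
  intro x _
  exact Bool.and_comm _ _

lemma fold_eq (data : List (List String × List String)) (tot : Int)
    (hpre : ∀ p ∈ data, p.1.Nodup ∧ p.2.Nodup) :
    data.foldl (fun tot p => tot + p.1.foldl (part1Inner p.2) 0) tot
      = data.foldl (fun total p =>
          let h := PySem.List.sorted (p.1.filter (fun n => n ≠ "")) (fun x => x) false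
          let w := PySem.List.sorted p.2 (fun x => x) false
          let m := mergeCount h w
          if m ≠ 0 then total + 2 ^ (m - 1) else total) tot := by
  induction data generalizing tot with
  | nil => rfl
  | cons p t ih =>
    have hp := hpre p (by simp)
    rw [List.foldl_cons, List.foldl_cons, ih _ (fun q hq => hpre q (by simp [hq]))]
    congr 1
    show tot + p.1.foldl (part1Inner p.2) 0
        = (if mergeCount (PySem.List.sorted (p.1.filter (fun n => n ≠ "")) (fun x => x) false)
                (PySem.List.sorted p.2 (fun x => x) false) ≠ 0
           then tot + 2 ^ (mergeCount (PySem.List.sorted (p.1.filter (fun n => n ≠ "")) (fun x => x) false)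
                (PySem.List.sorted p.2 (fun x => x) false) - 1) else tot)
    rw [inner_closed, card_count p.1 p.2 hp.1 hp.2]
    split_ifs <;> ring

-- ===== VERDICT (by name: the statement is the Claim_ definition above) =====
theorem part1_spec : Claim_equal_part1 := by
  intro data _ hpre
  unfold Spec_part1 part1 part1_alt
  exact fold_eq data 0 hpre
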